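-- pv_equiv track=rewrite | github.com/Canary-Builds/markview | markview_core.py | looks_like_csv
-- ===== SOURCE A (Python) =====
-- def looks_like_csv(text: str) -> tuple[str, bool]:
--     if not text or "\n" not in text:
--         return "", False
--     rows = [r for r in text.split("\n") if r.strip()]
--     if len(rows) < 2:
--         return "", False
--     for sep in ("\t", "|", ","):
--         counts = [r.count(sep) for r in rows]
--         if counts[0] >= 1 and all(c == counts[0] for c in counts):
--             return sep, True
--     return "", False
-- ===== SOURCE B (Python) =====
-- def looks_like_csv(text: str) -> tuple[str, bool]:
--     if not text or "\n" not in text: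
--         return "", False
--     rows = [r for r in text.split("\n") if r.strip()]
--     if len(rows) < 2:
--         return "", False
--     first, rest = rows[0], rows[1:]
--     # table: per-separator state = first-row count, or -1 once a row disagrees
--     table = [(s, first.count(s)) for s in ("\t", "|", ",")]
--     for r in rest:
--         table = [(s, f if r.count(s) == f else -1) for s, f in table]
--     for s, f in table:
--         if f >= 1:
--             return s, True
--     return "", False
-- ===== Notes on version B (the rewrite author's own statement) =====
-- stated objective: alternative
-- what changed: Instead of one rows-scan per separator, B builds a per-separator state table (first-row count, demoted to -1 on any disagreeing row) in a single pass over the remaining rows and then scans the table once for the first entry with count >= 1.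
import Mathlib
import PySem

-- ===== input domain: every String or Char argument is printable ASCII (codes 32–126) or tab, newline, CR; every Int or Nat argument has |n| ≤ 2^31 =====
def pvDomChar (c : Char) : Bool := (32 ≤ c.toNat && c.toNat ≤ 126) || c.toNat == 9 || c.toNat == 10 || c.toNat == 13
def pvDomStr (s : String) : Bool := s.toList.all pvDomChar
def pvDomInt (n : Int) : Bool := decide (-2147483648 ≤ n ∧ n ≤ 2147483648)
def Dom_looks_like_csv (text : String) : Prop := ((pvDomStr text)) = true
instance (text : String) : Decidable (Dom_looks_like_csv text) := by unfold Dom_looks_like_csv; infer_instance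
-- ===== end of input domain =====

-- B replaces A's per-separator scans of the rows by a single pass over the remaining rows
-- maintaining a per-separator state table (first-row count, demoted to -1 on disagreement),
-- then a final scan of the table; alternative decomposition, same cost, same return values.


-- ===== PORT A =====
-- A's 'for sep in ("\t","|",","):' loop: one counts list per separator, early return.
def csvLoopA (rows : List String) : List String → String × Bool
  | [] => ("", false)
  | sep :: seps =>
    let counts := rows.map (fun r => PySem.Str.count r sep)
    match counts with
    | [] => ("", false)   -- unreachable: the caller guarantees rows.length ≥ 2
    | c0 :: _ =>
      if decide (1 ≤ c0) && counts.all (fun c => c == c0) then (sep, true)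
      else csvLoopA rows seps

def looks_like_csv (text : String) : String × Bool :=
  if PySem.Str.len text == 0 || !PySem.Str.isIn "\n" text then ("", false)
  else
    let rows := ((PySem.Str.split? text "\n").getD []).filter (fun r => PySem.Str.strip r != "")
    if rows.length < 2 then ("", false)
    else csvLoopA rows ["\t", "|", ","]

-- ===== PORT B =====
-- one step of B's row pass: update every separator's state
def csvStepB (r : String) (table : List (String × Int)) : List (String × Int) :=
  table.map (fun p => (p.1, if ((PySem.Str.count r p.1 : Int)) == p.2 then p.2 else -1))

-- B's final scan of the table
def csvScanB : List (String × Int) → String × Bool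
  | [] => ("", false)
  | (s, f) :: rest => if decide (1 ≤ f) then (s, true) else csvScanB rest

def looks_like_csv_alt (text : String) : String × Bool :=
  if PySem.Str.len text == 0 || !PySem.Str.isIn "\n" text then ("", false)
  else
    let rows := ((PySem.Str.split? text "\n").getD []).filter (fun r => PySem.Str.strip r != "")
    if rows.length < 2 then ("", false)
    else
      match rows with
      | [] => ("", false)   -- unreachable: rows.length ≥ 2
      | first :: rest =>
        let table0 := ["\t", "|", ","].map (fun s => (s, (PySem.Str.count first s : Int)))
        csvScanB (rest.foldl (fun t r => csvStepB r t) table0)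

-- ===== PRECONDITION & SPEC =====
def Spec_looks_like_csv (text : String) (out : String × Bool) : Prop := out = looks_like_csv_alt text
instance (text : String) (out : String × Bool) : Decidable (Spec_looks_like_csv text out) := by unfold Spec_looks_like_csv; infer_instance

-- ===== CLAIM (what is proved, stated in full; the proofs are below) =====
def Claim_equal_looks_like_csv : Prop := ∀ (text : String), Dom_looks_like_csv text → Spec_looks_like_csv text (looks_like_csv text)

-- ===== LEMMAS AND PROOFS =====

-- B's fold of per-entry updates over the whole table = per-separator independent folds
theorem csv_foldl_stepB (rest : List String) (seps : List String) (v : String → Int) :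
    rest.foldl (fun t r => csvStepB r t) (seps.map fun s => (s, v s)) =
      seps.map (fun s => (s,
        rest.foldl (fun a r => if ((PySem.Str.count r s : Int)) == a then a else -1) (v s))) := by
  induction rest generalizing v with
  | nil => rfl
  | cons r rest ih =>
    simp only [List.foldl_cons]
    rw [show csvStepB r (seps.map fun s => (s, v s)) =
        seps.map (fun s => (s, if ((PySem.Str.count r s : Int)) == v s then v s else -1)) from by
      simp [csvStepB, List.map_map]]
    rw [ih (fun s => if ((PySem.Str.count r s : Int)) == v s then v s else -1)]

-- once a separator's state is -1 it stays -1
theorem csv_foldl_neg (c : String → Nat) (rest : List String) :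
    rest.foldl (fun a r => if ((c r : Int)) == a then a else -1) (-1) = -1 := by
  induction rest with
  | nil => rfl
  | cons r rest ih => simpa using ih

-- characterisation of one separator's final state
theorem csv_perSep (c : String → Nat) (c0 : Nat) (rest : List String) :
    rest.foldl (fun a r => if ((c r : Int)) == a then a else -1) ((c0 : Nat) : Int) =
      if rest.all (fun r => c r == c0) then ((c0 : Nat) : Int) else -1 := by
  induction rest with
  | nil => rfl
  | cons r rest ih =>
    simp only [List.foldl_cons]
    by_cases hc : c r = c0
    · rw [show (((c r : Nat) : Int) == ((c0 : Nat) : Int)) = true from by simp [hc]]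
      rw [if_pos rfl, ih]
      simp [List.all_cons, hc]
    · rw [show (((c r : Nat) : Int) == ((c0 : Nat) : Int)) = false from by simp [hc]]
      simp only [Bool.false_eq_true, if_false]
      rw [csv_foldl_neg c]
      simp [List.all_cons, hc]

-- A's separator loop equals B's table scan on the characterised table
theorem csv_loop_eq_scan (first : String) (rest : List String) (seps : List String) :
    csvLoopA (first :: rest) seps =
      csvScanB (seps.map fun s => (s,
        if rest.all (fun r => PySem.Str.count r s == PySem.Str.count first s)
          then ((PySem.Str.count first s : Nat) : Int) else -1)) := by
  induction seps with
  | nil => rfl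
  | cons s seps ih =>
    simp only [csvLoopA, csvScanB, List.map_cons, List.all_cons, List.all_map,
      beq_self_eq_true, Bool.true_and, Bool.and_eq_true, decide_eq_true_eq]
    by_cases hall : rest.all (fun r => PySem.Str.count r s == PySem.Str.count first s)
    · rw [if_pos hall]
      by_cases h1 : 1 ≤ PySem.Str.count first s
      · rw [if_pos ⟨h1, hall⟩, if_pos (by exact_mod_cast h1)]
      · rw [if_neg (fun h => h1 h.1), if_neg (by exact_mod_cast h1), ih]
    · rw [if_neg hall, if_neg (fun h => hall h.2), if_neg (by norm_num), ih]

-- ===== VERDICT (by name: the statement is the Claim_ definition above) =====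
theorem looks_like_csv_spec : Claim_equal_looks_like_csv := by
  intro text _
  unfold Spec_looks_like_csv looks_like_csv looks_like_csv_alt
  by_cases hg : (PySem.Str.len text == 0 || !PySem.Str.isIn "\n" text) = true
  · rw [if_pos hg, if_pos hg]
  · rw [if_neg hg, if_neg hg]
    set rows := ((PySem.Str.split? text "\n").getD []).filter
      (fun r => PySem.Str.strip r != "") with hrows
    by_cases hlen : rows.length < 2
    · rw [if_pos hlen, if_pos hlen]
    · rw [if_neg hlen, if_neg hlen]
      cases hr : rows with
      | nil => rw [hr] at hlen; simp at hlen
      | cons first rest =>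
        show csvLoopA (first :: rest) ["\t", "|", ","] =
          csvScanB (rest.foldl (fun t r => csvStepB r t)
            (["\t", "|", ","].map (fun s => (s, (PySem.Str.count first s : Int)))))
        rw [csv_foldl_stepB rest ["\t", "|", ","] (fun s => (PySem.Str.count first s : Int))]
        simp only [csv_perSep]
        exact csv_loop_eq_scan first rest _
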